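-- pv_equiv track=rewrite | github.com/dmitry957/codewars-training | kata/7-kyu/down-arrow-with-numbers/solution.py | get_a_down_arrow_of
-- ===== SOURCE A (Python) =====
-- def get_a_down_arrow_of(n):
--     if n < 1:
--         return ""
--
--     lines = []
--     for i in range(n):
--         indent = ' ' * i
--         peak = n - i
--         ascending = ''.join(str(j % 10) for j in range(1, peak + 1))
--         descending = ''.join(str(j % 10) for j in range(peak - 1, 0, -1))
--         line = indent + ascending + descending
--         lines.append(line)
--
--     return '\n'.join(lines)
-- ===== SOURCE B (Python) =====
-- def get_a_down_arrow_of(n):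
--     if n < 1:
--         return ""
--     digits = [str(j % 10) for j in range(1, n + 1)]
--     rows = []
--     pad = ''
--     while digits:
--         rows.append(pad + ''.join(digits) + ''.join(digits[:-1][::-1]))
--         digits.pop()
--         pad += ' '
--     return '\n'.join(rows)
-- ===== Notes on version B (the rewrite author's own statement) =====
-- stated objective: alternative
-- what changed: B builds the digit strings once and then produces rows top-down by consuming that list (append row, pop last digit, grow the pad), instead of recomputing the ascending and descending digit runs with str(j%10) over fresh ranges for every row.
import Mathlib
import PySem

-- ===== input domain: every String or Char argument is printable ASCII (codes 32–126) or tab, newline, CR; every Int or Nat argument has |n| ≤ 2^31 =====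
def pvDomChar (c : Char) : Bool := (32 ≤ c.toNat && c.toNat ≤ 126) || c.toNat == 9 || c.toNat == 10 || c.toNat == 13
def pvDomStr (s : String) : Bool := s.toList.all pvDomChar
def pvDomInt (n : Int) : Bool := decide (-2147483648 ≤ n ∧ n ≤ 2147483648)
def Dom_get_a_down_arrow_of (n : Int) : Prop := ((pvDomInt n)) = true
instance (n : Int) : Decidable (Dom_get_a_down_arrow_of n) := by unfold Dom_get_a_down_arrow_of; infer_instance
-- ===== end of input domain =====

-- B builds the digit list once and produces rows top-down by consuming it (pop + growing pad)
-- instead of recomputing ascending/descending digit ranges per row; same cost, different decomposition.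

-- ===== PORT A =====
-- str(j % 10) ported as PySem.Int.toChars (PySem.Int.mod j 10); strings handled as List Char,
-- converted once at the end with String.ofList (exact: all characters are ASCII digits/spaces/newlines).
def get_a_down_arrow_of (n : Int) : String :=
  if n < 1 then "" else
    let lines := (PySem.List.pyRange 0 n 1).foldl (fun lines i =>
      let indent := PySem.List.pyRepeat [' '] i
      let peak := n - i
      let ascending := PySem.Chars.join []
        ((PySem.List.pyRange 1 (peak + 1) 1).map (fun j => PySem.Int.toChars (PySem.Int.mod j 10)))
      let descending := PySem.Chars.join []
        ((PySem.List.pyRange (peak - 1) 0 (-1)).map (fun j => PySem.Int.toChars (PySem.Int.mod j 10)))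
      lines ++ [indent ++ ascending ++ descending]) ([] : List (List Char))
    String.ofList (PySem.Chars.join ['\n'] lines)

-- ===== PORT B =====
-- the 'while digits:' loop of Source B: emit a row, pop the last digit, grow the pad
-- (digits[:-1][::-1] ported as (slice digits none (-1)).reverse — [::-1] is reverse, PySem.List.slice?_none_none_neg_one)
def pvAltRows (digits : List (List Char)) (pad : List Char) : List (List Char) :=
  if h : digits = [] then []
  else
    (pad ++ PySem.Chars.join [] digits
         ++ PySem.Chars.join [] ((PySem.List.slice digits none (some (-1))).reverse))
      :: pvAltRows digits.dropLast (pad ++ [' '])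
termination_by digits.length
decreasing_by
  have : digits.length ≠ 0 := by simpa [List.length_eq_zero_iff] using h
  simp [List.length_dropLast]; omega

def get_a_down_arrow_of_alt (n : Int) : String :=
  if n < 1 then "" else
    let digits := (PySem.List.pyRange 1 (n + 1) 1).map (fun j => PySem.Int.toChars (PySem.Int.mod j 10))
    String.ofList (PySem.Chars.join ['\n'] (pvAltRows digits []))

-- ===== PRECONDITION & SPEC =====
def Spec_get_a_down_arrow_of (n : Int) (out : String) : Prop := out = get_a_down_arrow_of_alt n
instance (n : Int) (out : String) : Decidable (Spec_get_a_down_arrow_of n out) := by unfold Spec_get_a_down_arrow_of; infer_instance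

-- ===== CLAIM (what is proved, stated in full; the proofs are below) =====
def Claim_equal_get_a_down_arrow_of : Prop := ∀ (n : Int), Dom_get_a_down_arrow_of n → Spec_get_a_down_arrow_of n (get_a_down_arrow_of n)

-- ===== LEMMAS AND PROOFS =====

theorem foldl_append_singleton {α β : Type} (l : List α) (g : α → β) (init : List β) :
    l.foldl (fun acc x => acc ++ [g x]) init = init ++ l.map g := by
  induction l generalizing init with
  | nil => simp
  | cons x xs ih => simp [List.foldl_cons, ih, List.append_assoc]

theorem pvAltRows_eq (m : Nat) (ds : List (List Char)) (pad : List Char) (hm : ds.length = m) :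
    pvAltRows ds pad = (List.range m).map (fun k =>
      pad ++ List.replicate k ' ' ++ PySem.Chars.join [] (ds.take (m - k))
          ++ PySem.Chars.join [] ((ds.take (m - k)).dropLast.reverse)) := by
  induction m generalizing ds pad with
  | zero =>
    have : ds = [] := List.length_eq_zero_iff.mp hm
    subst this; simp [pvAltRows]
  | succ m ih =>
    have hne : ds ≠ [] := by intro h; subst h; simp at hm
    rw [pvAltRows]
    simp only [hne, dite_false]
    have hdl : ds.dropLast.length = m := by simp [List.length_dropLast, hm]
    rw [ih ds.dropLast (pad ++ [' ']) hdl]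
    rw [List.range_succ_eq_map, List.map_cons, List.map_map]
    congr 1
    · -- head row, k = 0
      have h1 : ds.take (m + 1 - 0) = ds := by
        rw [Nat.sub_zero, ← hm]; exact List.take_length
      rw [h1]
      have h2 : PySem.List.slice ds none (some (-1)) = ds.dropLast :=
        PySem.List.slice_to_neg_one ds
      simp [h2, List.append_assoc]
    · -- tail rows
      apply List.map_congr_left
      intro k hk
      have hkm : k < m := List.mem_range.mp hk
      have ht : ds.take (m + 1 - (k + 1)) = ds.dropLast.take (m - k) := by
        rw [List.dropLast_eq_take, hm]
        rw [List.take_take]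
        congr 1
        omega
      simp only [Function.comp]
      rw [ht]
      have hrep : pad ++ List.replicate (k + 1) ' ' = (pad ++ [' ']) ++ List.replicate k ' ' := by
        simp [List.replicate_succ]
      simp [hrep, List.append_assoc]

-- the digit-string for j, shared by both ports
theorem rowA_eq_rowB (n : Int) (hn : 1 ≤ n) (k : Nat) (hk : k < n.toNat) :
    (PySem.List.pyRepeat [' '] ((0 : Int) + (k : Int))
      ++ PySem.Chars.join []
        ((PySem.List.pyRange 1 ((n - ((0 : Int) + (k : Int))) + 1) 1).map
          (fun j => PySem.Int.toChars (PySem.Int.mod j 10)))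
      ++ PySem.Chars.join []
        ((PySem.List.pyRange ((n - ((0 : Int) + (k : Int))) - 1) 0 (-1)).map
          (fun j => PySem.Int.toChars (PySem.Int.mod j 10))))
    = ([] : List Char) ++ List.replicate k ' '
      ++ PySem.Chars.join []
        (((PySem.List.pyRange 1 (n + 1) 1).map (fun j => PySem.Int.toChars (PySem.Int.mod j 10))).take (n.toNat - k))
      ++ PySem.Chars.join []
        ((((PySem.List.pyRange 1 (n + 1) 1).map (fun j => PySem.Int.toChars (PySem.Int.mod j 10))).take (n.toNat - k)).dropLast.reverse) := by
  set f : Int → List Char := fun j => PySem.Int.toChars (PySem.Int.mod j 10) with hf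
  have hpeak : (0 : Int) + (k : Int) = (k : Int) := by ring
  rw [hpeak]
  -- indent
  have hind : PySem.List.pyRepeat [' '] (k : Int) = List.replicate k ' ' := by
    rw [PySem.List.pyRepeat_singleton]; simp
  -- ascending list = take of the full digit list
  have hasc : (PySem.List.pyRange 1 ((n - (k : Int)) + 1) 1).map f
      = ((PySem.List.pyRange 1 (n + 1) 1).map f).take (n.toNat - k) := by
    rw [← List.map_take]
    congr 1
    rw [PySem.List.pyRange_one, PySem.List.pyRange_one, ← List.map_take, List.take_range]
    congr 2
    omega
  -- descending list = reverse of dropLast of the take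
  have hdesc : (PySem.List.pyRange ((n - (k : Int)) - 1) 0 (-1)).map f
      = (((PySem.List.pyRange 1 (n + 1) 1).map f).take (n.toNat - k)).dropLast.reverse := by
    have h1 : PySem.List.pyRange ((n - (k : Int)) - 1) 0 (-1)
        = (PySem.List.pyRange 1 (n - (k : Int)) 1).reverse := by
      have := PySem.List.pyRange_neg_one_eq_reverse ((n - (k : Int)) - 1) 0
      simpa using this
    have h2 : (PySem.List.pyRange 1 (n - (k : Int)) 1).map f
        = (((PySem.List.pyRange 1 (n + 1) 1).map f).take (n.toNat - k)).dropLast := by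
      rw [← List.map_take, ← List.map_dropLast]
      congr 1
      rw [PySem.List.pyRange_one, PySem.List.pyRange_one, ← List.map_take, List.take_range,
        List.dropLast_eq_take, List.length_map, List.length_range, ← List.map_take, List.take_range]
      congr 2
      omega
    rw [h1, List.map_reverse, h2]
  rw [hind, hasc, hdesc]
  simp

-- ===== VERDICT (by name: the statement is the Claim_ definition above) =====
theorem get_a_down_arrow_of_spec : Claim_equal_get_a_down_arrow_of := by
  intro n _
  unfold Spec_get_a_down_arrow_of get_a_down_arrow_of get_a_down_arrow_of_alt
  by_cases hn : n < 1
  · simp [hn]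
  · simp only [hn, if_false]
    have hn1 : 1 ≤ n := by omega
    congr 1
    congr 1
    rw [foldl_append_singleton, List.nil_append]
    have hlen : ((PySem.List.pyRange 1 (n + 1) 1).map (fun j => PySem.Int.toChars (PySem.Int.mod j 10))).length = n.toNat := by
      simp [PySem.List.length_pyRange_one]
    rw [pvAltRows_eq n.toNat _ [] hlen]
    rw [PySem.List.pyRange_one, List.map_map]
    have hnn : (n - 0).toNat = n.toNat := by omega
    rw [hnn]
    apply List.map_congr_left
    intro k hk
    have hk' : k < n.toNat := List.mem_range.mp hk
    exact rowA_eq_rowB n hn1 k hk'
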